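-- pv_equiv track=rewrite | github.com/kentbraaten/PlantMonitorPi | waterLogClient.py | _flatenPotArray
-- ===== SOURCE A (Python) =====
-- def _flatenPotArray(potArray, flatMap):
--     if (len(potArray) == 0):
--         return flatMap
--     else:
--         pot = potArray[0]
--         idxStr = str(len(flatMap) // len(pot))
--         for prop in pot:
--             flatMap[prop+idxStr] = pot[prop]
--         return _flatenPotArray(potArray[1:len(potArray)], flatMap)
-- ===== SOURCE B (Python) =====
-- def _flatenPotArray(potArray, flatMap):
--     for pot in potArray:
--         idxStr = str(len(flatMap) // len(pot))
--         for prop, val in pot.items():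
--             flatMap[prop + idxStr] = val
--     return flatMap
-- ===== Notes on version B (the rewrite author's own statement) =====
-- stated objective: simpler
-- what changed: Replaces the list-slicing tail recursion (each step re-slices the remaining potArray with potArray[1:]) by a single plain for-loop with the running flatMap as accumulator.
import Mathlib
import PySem

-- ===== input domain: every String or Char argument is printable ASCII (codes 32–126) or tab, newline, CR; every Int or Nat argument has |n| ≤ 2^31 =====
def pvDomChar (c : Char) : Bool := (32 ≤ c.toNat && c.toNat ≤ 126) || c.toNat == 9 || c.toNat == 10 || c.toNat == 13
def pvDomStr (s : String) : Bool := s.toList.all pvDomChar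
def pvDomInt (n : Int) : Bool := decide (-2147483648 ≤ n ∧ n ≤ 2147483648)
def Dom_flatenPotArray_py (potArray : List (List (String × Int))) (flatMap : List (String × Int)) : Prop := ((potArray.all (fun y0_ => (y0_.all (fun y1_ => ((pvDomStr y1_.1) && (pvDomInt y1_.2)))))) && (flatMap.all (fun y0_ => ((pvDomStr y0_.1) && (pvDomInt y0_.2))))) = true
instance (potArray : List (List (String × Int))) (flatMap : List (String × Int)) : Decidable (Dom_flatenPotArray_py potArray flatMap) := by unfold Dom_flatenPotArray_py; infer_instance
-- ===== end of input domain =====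

-- ===== PORT A =====
-- One honest line: B replaces A's list-slicing tail recursion by an iterative loop
-- over potArray with the running flatMap dict as accumulator (simpler; no slicing, no
-- recursion-depth limit); both A and B mutate the flatMap dict argument in place and return it;
-- the equivalence proved here is about the RETURN value.
-- Recursion of A on the dict list; potArray[1:len(potArray)] ported via PySem.List.slice.
-- Cited by the port's decreasing_by, so it stays above the port.
theorem pvSliceOneLen {α : Type} (xs : List α) :
    PySem.List.slice xs (some 1) (some (xs.length : Int)) = xs.tail := by
  have h := PySem.List.slice_natCast (xs := xs) (a := 1) (b := xs.length)
  rw [show (some (1 : Int)) = some ((1 : Nat) : Int) by norm_num] at *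
  rw [h, List.drop_one]
  exact List.take_of_length_le (by simp)
def flatenPotArrayA_rec (potArray : List (PySem.Dict String Int)) (flatMap : PySem.Dict String Int) : PySem.Dict String Int :=
  if potArray.length = 0 then flatMap
  else
    match h : potArray with
    | [] => flatMap
    | pot :: _ =>
      let idxStr := PySem.Int.toStr (PySem.Int.floordiv (flatMap.size : Int) (pot.size : Int))
      let flatMap' := pot.items.foldl (fun fm p => fm.insert (p.1 ++ idxStr) p.2) flatMap
      flatenPotArrayA_rec (PySem.List.slice potArray (some 1) (some (potArray.length : Int))) flatMap'
  termination_by potArray.length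
  decreasing_by subst h; rw [pvSliceOneLen]; simp

def flatenPotArray_py (potArray : List (List (String × Int))) (flatMap : List (String × Int)) : List (String × Int) :=
  (flatenPotArrayA_rec (potArray.map PySem.Dict.ofList) (PySem.Dict.ofList flatMap)).items

-- ===== PORT B =====
def flatenPotArray_py_alt (potArray : List (List (String × Int))) (flatMap : List (String × Int)) : List (String × Int) :=
  (potArray.foldl
    (fun fm potRaw =>
      let pot := PySem.Dict.ofList potRaw
      let idxStr := PySem.Int.toStr (PySem.Int.floordiv (fm.size : Int) (pot.size : Int))
      pot.items.foldl (fun fm p => fm.insert (p.1 ++ idxStr) p.2) fm)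
    (PySem.Dict.ofList flatMap)).items

-- ===== PRECONDITION & SPEC =====
-- Python A (and B) raise ZeroDivisionError on an empty pot dict (len(pot) == 0); Pre_ excludes those inputs.
def Pre_flatenPotArray_py (potArray : List (List (String × Int))) (flatMap : List (String × Int)) : Prop :=
  ∀ pot ∈ potArray, pot ≠ []
instance (potArray : List (List (String × Int))) (flatMap : List (String × Int)) : Decidable (Pre_flatenPotArray_py potArray flatMap) := by unfold Pre_flatenPotArray_py; infer_instance
def pvWitness_flatenPotArray_py : (List (List (String × Int))) × (List (String × Int)) :=
  ([[("a", 1), ("b", 2)], [("a", 3)]], [("c", 0)])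
def Spec_flatenPotArray_py (potArray : List (List (String × Int))) (flatMap : List (String × Int)) (out : List (String × Int)) : Prop := out = flatenPotArray_py_alt potArray flatMap
instance (potArray : List (List (String × Int))) (flatMap : List (String × Int)) (out : List (String × Int)) : Decidable (Spec_flatenPotArray_py potArray flatMap out) := by unfold Spec_flatenPotArray_py; infer_instance

-- ===== CLAIM (what is proved, stated in full; the proofs are below) =====
def Claim_equal_flatenPotArray_py : Prop := ∀ (potArray : List (List (String × Int))) (flatMap : List (String × Int)), Dom_flatenPotArray_py potArray flatMap → Pre_flatenPotArray_py potArray flatMap → Spec_flatenPotArray_py potArray flatMap (flatenPotArray_py potArray flatMap)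

-- ===== LEMMAS AND PROOFS =====
theorem flatenPotArrayA_rec_eq_foldl (potArray : List (PySem.Dict String Int)) (flatMap : PySem.Dict String Int) :
    flatenPotArrayA_rec potArray flatMap =
      potArray.foldl
        (fun fm pot =>
          let idxStr := PySem.Int.toStr (PySem.Int.floordiv (fm.size : Int) (pot.size : Int))
          pot.items.foldl (fun fm p => fm.insert (p.1 ++ idxStr) p.2) fm)
        flatMap := by
  induction potArray generalizing flatMap with
  | nil => simp [flatenPotArrayA_rec]
  | cons pot rest ih =>
    rw [flatenPotArrayA_rec]
    simp only [List.length_cons, List.foldl_cons]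
    have hslice := pvSliceOneLen (pot :: rest)
    simp only [List.length_cons, List.tail_cons] at hslice
    rw [if_neg (by omega), hslice, ih]

-- ===== VERDICT (by name: the statement is the Claim_ definition above) =====
theorem flatenPotArray_py_spec : Claim_equal_flatenPotArray_py := by
  intro potArray flatMap _ _
  unfold Spec_flatenPotArray_py flatenPotArray_py flatenPotArray_py_alt
  rw [flatenPotArrayA_rec_eq_foldl, List.foldl_map]
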